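-- pv_equiv track=rewrite | github.com/karthikeya142/python_projects | S50_Python_Practices_Clean _fficient_Python/message.py | unique_messages_within_window
-- ===== SOURCE A (Python) =====
-- from typing import List, Dict
--
-- def unique_messages_within_window(window: int, messages: List[Dict[str, int]]) -> List[Dict[str, int]]:
--     if not messages:
--         return []
--
--     # Sort messages by timestamp to easily get the latest message timestamp
--     messages_sorted = sorted(messages, key=lambda x: x['timestamp'])
--     latest_timestamp = messages_sorted[-1]['timestamp']
--
--     # Filter messages within the time window
--     filtered_messages = [
--         msg for msg in messages_sorted
--         if latest_timestamp - msg['timestamp'] <= window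
--     ]
--
--     # Use a dictionary to track the latest occurrence of each unique message by content
--     unique_messages = {}
--     for msg in filtered_messages:
--         unique_messages[msg['content']] = msg  # Keeps the latest occurrence due to sorted order
--
--     # Return only the unique messages, in the order of their occurrence in the filtered list
--     return list(unique_messages.values())
-- ===== SOURCE B (Python) =====
-- from typing import List, Dict
--
-- def _upd(g, ts, i, msg):
--     # fold one in-window message into its content group:
--     # g = (min_ts, min_idx, best_msg, best_ts) or None
--     if g is None:
--         return (ts, i, msg, ts)
--     mn, mi, bm, bt = g
--     mnmi = (ts, i) if ts < mn else (mn, mi)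
--     bmbt = (msg, ts) if bt <= ts else (bm, bt)
--     return (mnmi[0], mnmi[1], bmbt[0], bmbt[1])
--
-- def unique_messages_within_window(window: int, messages: List[Dict[str, int]]) -> List[Dict[str, int]]:
--     if not messages:
--         return []
--
--     # One pass for the newest timestamp (no global sort).
--     max_ts = max(messages, key=lambda m: m['timestamp'])['timestamp']
--
--     # Group the in-window messages by content in a single pass over the
--     # original list, keeping per content:
--     #   (min_ts, min_idx)   -> where its first occurrence lands in a stable
--     #                          timestamp sort (min timestamp, earliest index at it)
--     #   (best_msg, best_ts) -> the message with the max timestamp, last one on ties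
--     groups = {}
--     for i, msg in enumerate(messages):
--         ts = msg['timestamp']
--         if window < max_ts - ts:
--             continue
--         c = msg['content']
--         groups[c] = _upd(groups.get(c), ts, i, msg)
--
--     # Emit kept messages ordered by (min_ts, min_idx): exactly the order of
--     # first occurrence in a stable sort by timestamp.
--     return [g[2] for g in sorted(groups.values(), key=lambda g: (g[0], g[1]))]
-- ===== Notes on version B (the rewrite author's own statement) =====
-- stated objective: alternative
-- what changed: Replaces sort-everything-then-filter-then-dict-dedup by a one-pass max-timestamp scan plus a single group-by-content pass over the original list (tracking per content the (min_ts, first index at it) and the last message with the max timestamp), then sorts only the distinct groups by (min_ts, min_idx).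
import Mathlib
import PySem

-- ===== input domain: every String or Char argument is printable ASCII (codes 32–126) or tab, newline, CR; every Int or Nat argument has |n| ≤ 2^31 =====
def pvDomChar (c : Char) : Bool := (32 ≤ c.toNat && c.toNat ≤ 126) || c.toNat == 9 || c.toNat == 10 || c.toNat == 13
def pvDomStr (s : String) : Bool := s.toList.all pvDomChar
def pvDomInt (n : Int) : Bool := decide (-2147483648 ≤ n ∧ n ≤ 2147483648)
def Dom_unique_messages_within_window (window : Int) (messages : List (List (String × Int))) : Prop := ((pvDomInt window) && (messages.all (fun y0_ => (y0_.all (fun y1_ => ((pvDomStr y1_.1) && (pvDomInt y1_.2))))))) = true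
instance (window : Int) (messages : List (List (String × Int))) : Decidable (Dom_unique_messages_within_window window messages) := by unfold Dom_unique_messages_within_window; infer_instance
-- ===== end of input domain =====

-- B replaces sort-all-then-dict-dedup by a one-pass max + group-by-content pass + a sort of the distinct groups (alternative decomposition, same results).


-- ===== PORT A =====
-- msg['timestamp'] / msg['content'] (KeyError excluded by Pre_, where 0 is never read)
def pvTs (m : List (String × Int)) : Int := (PySem.Dict.mk m).getD "timestamp" 0
def pvC (m : List (String × Int)) : Int := (PySem.Dict.mk m).getD "content" 0

def unique_messages_within_window (window : Int) (messages : List (List (String × Int))) : List (List (String × Int)) :=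
  if messages = [] then []
  else
    let messages_sorted := PySem.List.sorted messages (fun m => pvTs m) false
    let latest := pvTs (PySem.List.pyGetD messages_sorted (-1) [])
    let filtered := messages_sorted.filter (fun m => decide (latest - pvTs m ≤ window))
    let d := filtered.foldl (fun d m => d.insert (pvC m) m)
      (PySem.Dict.empty : PySem.Dict Int (List (String × Int)))
    d.values

-- ===== PORT B =====
-- enumerate(messages)
def pvEnum {α : Type} (i : Int) : List α → List (Int × α)
  | [] => []
  | x :: xs => (i, x) :: pvEnum (i + 1) xs

-- _upd(g, ts, i, msg)
def pvGStep (g : Option (Int × Int × List (String × Int) × Int)) (ts i : Int)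
    (msg : List (String × Int)) : Int × Int × List (String × Int) × Int :=
  match g with
  | none => (ts, i, msg, ts)
  | some (mn, mi, bm, bt) =>
    let mnmi := if ts < mn then (ts, i) else (mn, mi)
    let bmbt := if bt ≤ ts then (msg, ts) else (bm, bt)
    (mnmi.1, mnmi.2, bmbt.1, bmbt.2)

def unique_messages_within_window_alt (window : Int) (messages : List (List (String × Int))) : List (List (String × Int)) :=
  if messages = [] then []
  else
    let max_ts := match PySem.List.max? messages (fun m => pvTs m) with
      | some m => pvTs m
      | none => 0   -- unreachable: messages ≠ []
    let groups := (pvEnum 0 messages).foldl (fun d p =>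
      if window < max_ts - pvTs p.2 then d
      else
        d.insert (pvC p.2) (pvGStep (d.get? (pvC p.2)) (pvTs p.2) p.1 p.2))
      (PySem.Dict.empty : PySem.Dict Int (Int × Int × List (String × Int) × Int))
    (PySem.List.sorted2 groups.values (fun g => g.1) (fun g => g.2.1) false).map (fun g => g.2.2.1)

-- ===== PRECONDITION & SPEC =====
-- Pre_ excludes exactly the KeyError inputs: every message must carry 'timestamp',
-- and every message inside the window must carry 'content' (A and B read exactly those keys).
def Pre_unique_messages_within_window (window : Int) (messages : List (List (String × Int))) : Prop :=
  ∀ m ∈ messages, (PySem.Dict.mk m).contains "timestamp" = true ∧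
    ((∀ m' ∈ messages, pvTs m' - pvTs m ≤ window) → (PySem.Dict.mk m).contains "content" = true)
instance (window : Int) (messages : List (List (String × Int))) : Decidable (Pre_unique_messages_within_window window messages) := by unfold Pre_unique_messages_within_window; infer_instance

def pvWitness_unique_messages_within_window : Int × (List (List (String × Int))) :=
  (1, [[("timestamp", 3), ("content", 1)], [("timestamp", 2), ("content", 1)]])

def Spec_unique_messages_within_window (window : Int) (messages : List (List (String × Int))) (out : List (List (String × Int))) : Prop := out = unique_messages_within_window_alt window messages
instance (window : Int) (messages : List (List (String × Int))) (out : List (List (String × Int))) : Decidable (Spec_unique_messages_within_window window messages out) := by unfold Spec_unique_messages_within_window; infer_instance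

-- ===== CLAIM (what is proved, stated in full; the proofs are below) =====
def Claim_equal_unique_messages_within_window : Prop := ∀ (window : Int) (messages : List (List (String × Int))), Dom_unique_messages_within_window window messages → Pre_unique_messages_within_window window messages → Spec_unique_messages_within_window window messages (unique_messages_within_window window messages)

-- ===== LEMMAS AND PROOFS =====

-- record abbreviations: a record is (index, message)
def pvKeyE (p : Int × List (String × Int)) : Int ×ₗ Int := toLex (pvTs p.2, p.1)
def pvLexLe (p q : Int × List (String × Int)) : Prop :=
  pvTs p.2 < pvTs q.2 ∨ (pvTs p.2 = pvTs q.2 ∧ p.1 ≤ q.1)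
def pvLexLt (p q : Int × List (String × Int)) : Prop :=
  pvTs p.2 < pvTs q.2 ∨ (pvTs p.2 = pvTs q.2 ∧ p.1 < q.1)
def pvD0 : Int × List (String × Int) := (0, [])
def pvGrp (X : List (Int × List (String × Int))) (k : Int) : List (Int × List (String × Int)) :=
  X.filter (fun p => pvC p.2 == k)
def pvVX (X : List (Int × List (String × Int))) (k : Int) : Int × Int × List (String × Int) × Int :=
  (pvTs ((pvGrp X k).headD pvD0).2, ((pvGrp X k).headD pvD0).1,
   ((pvGrp X k).getLastD pvD0).2, pvTs ((pvGrp X k).getLastD pvD0).2)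
def pvDedup : List Int → List Int
  | [] => []
  | a :: l => a :: (pvDedup l).filter (fun x => x != a)

-- ---- pvEnum facts ----
lemma pvEnum_idx_le {α : Type} (l : List α) (i : Int) : ∀ p ∈ pvEnum i l, i ≤ p.1 := by
  induction l generalizing i with
  | nil => simp [pvEnum]
  | cons x xs ih =>
    intro p hp
    rcases List.mem_cons.mp hp with h | h
    · subst h; simp
    · have := ih (i + 1) p h; omega
lemma pvEnum_pairwise {α : Type} (l : List α) (i : Int) :
    (pvEnum i l).Pairwise (fun p q => p.1 < q.1) := by
  induction l generalizing i with
  | nil => simp [pvEnum]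
  | cons x xs ih =>
    refine List.Pairwise.cons ?_ (ih (i + 1))
    intro q hq
    have := pvEnum_idx_le xs (i + 1) q hq
    simp only
    omega

-- ---- stability: sorting messages = sorting (index, message) records by (ts, index) ----
lemma pvInsertBy_snd (x : List (String × Int)) (i : Int) (acc : List (Int × List (String × Int)))
    (h : ∀ p ∈ acc, p.1 < i) :
    (PySem.List.insertBy (fun a b => decide (pvKeyE a < pvKeyE b)) (i, x) acc).map Prod.snd
      = PySem.List.insertBy (fun a b => decide (pvTs a < pvTs b)) x (acc.map Prod.snd) := by
  induction acc with
  | nil => simp [PySem.List.insertBy]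
  | cons q acc ih =>
    have hq : q.1 < i := h q (List.mem_cons_self)
    have hd : decide (pvKeyE (i, x) < pvKeyE q) = decide (pvTs x < pvTs q.2) := by
      apply decide_eq_decide.mpr
      simp only [pvKeyE, Prod.Lex.toLex_lt_toLex]
      constructor
      · rintro (h1 | ⟨h1, h2⟩)
        · exact h1
        · omega
      · exact fun h1 => Or.inl h1
    rw [PySem.List.insertBy.eq_def]
    conv_rhs => rw [PySem.List.insertBy.eq_def]
    simp only [hd]
    by_cases hc : pvTs x < pvTs q.2
    · simp [hc]
    · simp only [hc, decide_false, Bool.false_eq_true, if_false, List.map_cons]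
      rw [ih (fun p hp => h p (List.mem_cons_of_mem q hp))]
lemma pvStabFold : ∀ (l : List (List (String × Int))) (i : Int) (acc : List (Int × List (String × Int))),
    (∀ p ∈ acc, p.1 < i) →
    ((pvEnum i l).foldl (fun acc x => PySem.List.insertBy (fun a b => decide (pvKeyE a < pvKeyE b)) x acc) acc).map Prod.snd
      = l.foldl (fun acc x => PySem.List.insertBy (fun a b => decide (pvTs a < pvTs b)) x acc) (acc.map Prod.snd) := by
  intro l
  induction l with
  | nil => intro i acc h; simp [pvEnum]
  | cons x xs ih =>
    intro i acc h
    simp only [pvEnum, List.foldl_cons]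
    rw [ih (i + 1) _ ?_, pvInsertBy_snd x i acc h]
    intro p hp
    rcases (PySem.List.mem_insertBy _ _ _ _).mp hp with h1 | h1
    · subst h1; omega
    · have := h p h1; omega
lemma pvStab (messages : List (List (String × Int))) :
    PySem.List.sorted messages (fun m => pvTs m) false
      = (PySem.List.sorted (pvEnum 0 messages) pvKeyE false).map Prod.snd := by
  rw [PySem.List.sorted_eq_foldl_insertBy messages (fun m => pvTs m),
    PySem.List.sorted_eq_foldl_insertBy (pvEnum 0 messages) pvKeyE]
  have := pvStabFold messages 0 [] (by simp)
  simpa using this.symm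

-- ---- the sorted record list is strictly increasing in (ts, index) ----
lemma pvSortedE_nodup_fst (messages : List (List (String × Int))) :
    ((PySem.List.sorted (pvEnum 0 messages) pvKeyE false).map Prod.fst).Nodup := by
  have h1 : ((pvEnum 0 messages).map Prod.fst).Nodup := by
    unfold List.Nodup
    rw [List.pairwise_map]
    exact (pvEnum_pairwise messages 0).imp (fun h => Int.ne_of_lt h)
  have hperm := (PySem.List.sorted_perm (pvEnum 0 messages) pvKeyE false).map Prod.fst
  exact hperm.nodup_iff.mpr h1

lemma pvSortedE_pairwise (messages : List (List (String × Int))) :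
    (PySem.List.sorted (pvEnum 0 messages) pvKeyE false).Pairwise pvLexLt := by
  have hle := PySem.List.sorted_pairwise (pvEnum 0 messages) pvKeyE
  have hnd := pvSortedE_nodup_fst messages
  have hne : (PySem.List.sorted (pvEnum 0 messages) pvKeyE false).Pairwise (fun p q => p.1 ≠ q.1) := by
    unfold List.Nodup at hnd
    rw [List.pairwise_map] at hnd
    exact hnd
  refine List.Pairwise.imp ?_ (hle.and hne)
  intro a b hab
  obtain ⟨h1, h2⟩ := hab
  rw [pvKeyE, pvKeyE, Prod.Lex.toLex_le_toLex] at h1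
  unfold pvLexLt
  omega
-- ---- A-side dict fold: last write per content ----
lemma pvDictA_get? : ∀ (l : List (List (String × Int))) (d : PySem.Dict Int (List (String × Int))) (k : Int),
    ((l.foldl (fun d m => d.insert (pvC m) m) d).get? k)
      = ((l.reverse.find? (fun m => pvC m == k)).or (d.get? k)) := by
  intro l
  induction l with
  | nil => intro d k; simp
  | cons m l ih =>
    intro d k
    simp only [List.foldl_cons, List.reverse_cons, List.find?_append]
    rw [ih]
    have h1 : (d.insert (pvC m) m).get? k = (List.find? (fun m => pvC m == k) [m]).or (d.get? k) := by
      rw [PySem.Dict.get?_insert]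
      by_cases hk : k = pvC m
      · simp [List.find?, hk]
      · have : (pvC m == k) = false := by simp [Ne.symm hk]
        simp [List.find?, this, hk]
    rw [h1, Option.or_assoc]

-- ---- B-side dict fold: per-content group fold ----
lemma pvDictB_get? : ∀ (l : List (Int × List (String × Int)))
    (d : PySem.Dict Int (Int × Int × List (String × Int) × Int)) (k : Int),
    ((l.foldl (fun d p => d.insert (pvC p.2) (pvGStep (d.get? (pvC p.2)) (pvTs p.2) p.1 p.2)) d).get? k)
      = ((l.filter (fun p => pvC p.2 == k)).foldl (fun s p => some (pvGStep s (pvTs p.2) p.1 p.2)) (d.get? k)) := by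
  intro l
  induction l with
  | nil => intro d k; simp
  | cons p l ih =>
    intro d k
    simp only [List.foldl_cons, List.filter_cons]
    by_cases hc : pvC p.2 = k
    · have hb : (pvC p.2 == k) = true := by simp [hc]
      simp only [hb, if_true, List.foldl_cons]
      rw [ih]
      congr 1
      rw [PySem.Dict.get?_insert]
      simp [hc]
    · have hb : (pvC p.2 == k) = false := by simp [hc]
      simp only [hb, Bool.false_eq_true, if_false]
      rw [ih]
      congr 1
      rw [PySem.Dict.get?_insert]
      simp [Ne.symm hc]

-- ---- Set.ofList is first-occurrence dedup ----
lemma pvFoldlAdd_eq : ∀ (l s : List Int),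
    l.foldl PySem.Set.add s = s ++ (pvDedup l).filter (fun x => !s.elem x) := by
  intro l
  induction l with
  | nil => intro s; simp [pvDedup]
  | cons a l ih =>
    intro s
    simp only [List.foldl_cons, pvDedup]
    rw [ih]
    by_cases hs : a ∈ s
    · have hadd : PySem.Set.add s a = s := by
        simp only [PySem.Set.add, PySem.Set.contains]
        simp [hs]
      rw [hadd]
      have hsel : List.elem a s = true := by simpa using hs
      simp only [List.filter_cons, hsel, Bool.not_true, Bool.false_eq_true, if_false]
      congr 1
      rw [List.filter_filter]
      apply List.filter_congr
      intro x hx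
      by_cases hxa : x = a
      · subst hxa; simp [hs]
      · simp [hxa]
    · have hadd : PySem.Set.add s a = s ++ [a] := by
        simp only [PySem.Set.add, PySem.Set.contains]
        simp [hs]
      rw [hadd]
      have hsel : List.elem a s = false := by simpa using hs
      simp only [List.filter_cons, hsel, Bool.not_false, if_true, List.append_assoc, List.singleton_append]
      congr 2
      rw [List.filter_filter]
      apply List.filter_congr
      intro x hx
      by_cases hxa : x = a
      · subst hxa; simp
      · simp [hxa, List.mem_append]
lemma pvOfList_eq_pvDedup (l : List Int) : PySem.Set.ofList l = pvDedup l := by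
  have h := pvFoldlAdd_eq l []
  simp only [List.nil_append, List.elem_nil, Bool.not_false, List.filter_true] at h
  exact h
lemma pvMem_pvDedup (l : List Int) (x : Int) : x ∈ pvDedup l ↔ x ∈ l := by
  induction l with
  | nil => simp [pvDedup]
  | cons a l ih =>
    simp only [pvDedup, List.mem_cons, List.mem_filter, ih]
    by_cases hxa : x = a
    · simp [hxa]
    · simp [hxa]
lemma pvNodup_pvDedup (l : List Int) : (pvDedup l).Nodup := by
  induction l with
  | nil => simp [pvDedup]
  | cons a l ih =>
    simp only [pvDedup]
    refine List.Nodup.cons ?_ (ih.filter _)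
    simp

-- ---- lex order helpers ----
lemma pvLexLe_refl (p : Int × List (String × Int)) : pvLexLe p p := by
  unfold pvLexLe; omega
lemma pvLexLe_trans {p q r : Int × List (String × Int)} (h1 : pvLexLe p q) (h2 : pvLexLe q r) : pvLexLe p r := by
  unfold pvLexLe at *; omega
lemma pvLexLt_le {p q : Int × List (String × Int)} (h : pvLexLt p q) : pvLexLe p q := by
  unfold pvLexLt at h; unfold pvLexLe; omega
lemma pvLexLe_antisymm_mem {Z : List (Int × List (String × Int))} {p q : Int × List (String × Int)}
    (hnd : (Z.map Prod.fst).Nodup) (hp : p ∈ Z) (hq : q ∈ Z)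
    (h1 : pvLexLe p q) (h2 : pvLexLe q p) : p = q := by
  have h3 : p.1 = q.1 := by unfold pvLexLe at h1 h2; omega
  exact List.inj_on_of_nodup_map hnd hp hq h3

lemma pvGetLast?_some {α : Type} (l : List α) (h : l ≠ []) : ∃ z, l.getLast? = some z := by
  cases hz : l.getLast? with
  | none => exact absurd (List.getLast?_eq_none_iff.mp hz) h
  | some z => exact ⟨z, rfl⟩
lemma pvGetLastD_cons {α : Type} (a d : α) (t : List α) (h : t ≠ []) :
    (a :: t).getLastD d = t.getLastD d := by
  obtain ⟨z, hz⟩ := pvGetLast?_some t h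
  simp [List.getLastD_eq_getLast?, List.getLast?_cons, hz]

-- ---- head / last of a lex-sorted list are the lex extremes ----
lemma pvHead_min {X : List (Int × List (String × Int))} (hX : X.Pairwise pvLexLt) (hne : X ≠ []) :
    X.headD pvD0 ∈ X ∧ ∀ q ∈ X, pvLexLe (X.headD pvD0) q := by
  cases X with
  | nil => exact absurd rfl hne
  | cons x t =>
    obtain ⟨hx, ht⟩ := List.pairwise_cons.mp hX
    refine ⟨by simp, ?_⟩
    intro q hq
    rcases List.mem_cons.mp hq with h | h
    · subst h; exact pvLexLe_refl _
    · simpa using pvLexLt_le (hx q h)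
lemma pvLast_max {X : List (Int × List (String × Int))} (hX : X.Pairwise pvLexLt) (hne : X ≠ []) :
    X.getLastD pvD0 ∈ X ∧ ∀ q ∈ X, pvLexLe q (X.getLastD pvD0) := by
  induction X with
  | nil => exact absurd rfl hne
  | cons x t ih =>
    obtain ⟨hx, ht⟩ := List.pairwise_cons.mp hX
    by_cases htne : t = []
    · subst htne
      refine ⟨by simp, ?_⟩
      intro q hq
      rcases List.mem_cons.mp hq with h | h
      · subst h; simp [pvLexLe_refl]
      · simp at h
    · obtain ⟨hmem, hmax⟩ := ih ht htne
      rw [pvGetLastD_cons _ _ _ htne]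
      refine ⟨List.mem_cons_of_mem x hmem, ?_⟩
      intro q hq
      rcases List.mem_cons.mp hq with h | h
      · subst h; exact pvLexLt_le (hx _ hmem)
      · exact hmax q h

-- ---- the group fold computes the lex extremes of an index-increasing list ----
lemma pvGFold_inv : ∀ (Y : List (Int × List (String × Int))) (pm pM : Int × List (String × Int)),
    (∀ q ∈ Y, pm.1 < q.1) → (∀ q ∈ Y, pM.1 < q.1) → Y.Pairwise (fun p q => p.1 < q.1) →
    ∃ pm' pM', (pm' = pm ∨ pm' ∈ Y) ∧ (pM' = pM ∨ pM' ∈ Y) ∧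
      Y.foldl (fun s p => some (pvGStep s (pvTs p.2) p.1 p.2)) (some (pvTs pm.2, pm.1, pM.2, pvTs pM.2))
        = some (pvTs pm'.2, pm'.1, pM'.2, pvTs pM'.2) ∧
      pvLexLe pm' pm ∧ (∀ q ∈ Y, pvLexLe pm' q) ∧ pvLexLe pM pM' ∧ (∀ q ∈ Y, pvLexLe q pM') := by
  intro Y
  induction Y with
  | nil =>
    intro pm pM h1 h2 h3
    exact ⟨pm, pM, Or.inl rfl, Or.inl rfl, rfl, pvLexLe_refl _, by simp, pvLexLe_refl _, by simp⟩
  | cons y Y ih =>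
    intro pm pM h1 h2 h3
    obtain ⟨hy, h3'⟩ := List.pairwise_cons.mp h3
    have hpm_y : pm.1 < y.1 := h1 y List.mem_cons_self
    have hpM_y : pM.1 < y.1 := h2 y List.mem_cons_self
    set pm₁ := if pvTs y.2 < pvTs pm.2 then y else pm with hpm₁
    set pM₁ := if pvTs pM.2 ≤ pvTs y.2 then y else pM with hpM₁
    have hstep : pvGStep (some (pvTs pm.2, pm.1, pM.2, pvTs pM.2)) (pvTs y.2) y.1 y.2
        = (pvTs pm₁.2, pm₁.1, pM₁.2, pvTs pM₁.2) := by
      simp only [pvGStep, hpm₁, hpM₁]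
      by_cases hc1 : pvTs y.2 < pvTs pm.2 <;> by_cases hc2 : pvTs pM.2 ≤ pvTs y.2 <;>
        simp [hc1, hc2]
    have hm1' : ∀ q ∈ Y, pm₁.1 < q.1 := by
      intro q hq
      have hq1 := hy q hq
      have hq2 := h1 q (List.mem_cons_of_mem _ hq)
      by_cases hc : pvTs y.2 < pvTs pm.2 <;> simp [hpm₁, hc] <;> omega
    have hm2' : ∀ q ∈ Y, pM₁.1 < q.1 := by
      intro q hq
      have hq1 := hy q hq
      have hq2 := h2 q (List.mem_cons_of_mem _ hq)
      by_cases hc : pvTs pM.2 ≤ pvTs y.2 <;> simp [hpM₁, hc] <;> omega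
    obtain ⟨pm', pM', hmem1, hmem2, hfold', hle1, hall1, hle2, hall2⟩ := ih pm₁ pM₁ hm1' hm2' h3'
    have hpm₁_le_pm : pvLexLe pm₁ pm := by
      by_cases hc : pvTs y.2 < pvTs pm.2 <;> simp [hpm₁, hc] <;> unfold pvLexLe <;> omega
    have hpm₁_le_y : pvLexLe pm₁ y := by
      by_cases hc : pvTs y.2 < pvTs pm.2 <;> simp [hpm₁, hc] <;> unfold pvLexLe <;> omega
    have hpM_le_pM₁ : pvLexLe pM pM₁ := by
      by_cases hc : pvTs pM.2 ≤ pvTs y.2 <;> simp [hpM₁, hc] <;> unfold pvLexLe <;> omega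
    have hy_le_pM₁ : pvLexLe y pM₁ := by
      by_cases hc : pvTs pM.2 ≤ pvTs y.2 <;> simp [hpM₁, hc] <;> unfold pvLexLe <;> omega
    refine ⟨pm', pM', ?_, ?_, ?_, ?_, ?_, ?_, ?_⟩
    · rcases hmem1 with h | h
      · subst h
        by_cases hc : pvTs y.2 < pvTs pm.2
        · right; simp [hpm₁, hc]
        · left; simp [hpm₁, hc]
      · exact Or.inr (List.mem_cons_of_mem _ h)
    · rcases hmem2 with h | h
      · subst h
        by_cases hc : pvTs pM.2 ≤ pvTs y.2
        · right; simp [hpM₁, hc]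
        · left; simp [hpM₁, hc]
      · exact Or.inr (List.mem_cons_of_mem _ h)
    · rw [List.foldl_cons]
      simpa [hstep] using hfold'
    · exact pvLexLe_trans hle1 hpm₁_le_pm
    · intro q hq
      rcases List.mem_cons.mp hq with h | h
      · subst h; exact pvLexLe_trans hle1 hpm₁_le_y
      · exact hall1 q h
    · exact pvLexLe_trans hpM_le_pM₁ hle2
    · intro q hq
      rcases List.mem_cons.mp hq with h | h
      · subst h; exact pvLexLe_trans hy_le_pM₁ hle2
      · exact hall2 q h
lemma pvGFold_closed (Y : List (Int × List (String × Int))) (hY : Y.Pairwise (fun p q => p.1 < q.1))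
    (hne : Y ≠ []) :
    ∃ pm' pM', pm' ∈ Y ∧ pM' ∈ Y ∧
      Y.foldl (fun s p => some (pvGStep s (pvTs p.2) p.1 p.2)) none = some (pvTs pm'.2, pm'.1, pM'.2, pvTs pM'.2) ∧
      (∀ q ∈ Y, pvLexLe pm' q) ∧ (∀ q ∈ Y, pvLexLe q pM') := by
  cases Y with
  | nil => exact absurd rfl hne
  | cons y t =>
    obtain ⟨hy, ht⟩ := List.pairwise_cons.mp hY
    obtain ⟨pm', pM', hm1, hm2, hfold, hle1, hall1, hle2, hall2⟩ := pvGFold_inv t y y hy hy ht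
    refine ⟨pm', pM', ?_, ?_, ?_, ?_, ?_⟩
    · rcases hm1 with h | h
      · exact h ▸ List.mem_cons_self
      · exact List.mem_cons_of_mem _ h
    · rcases hm2 with h | h
      · exact h ▸ List.mem_cons_self
      · exact List.mem_cons_of_mem _ h
    · rw [List.foldl_cons]
      have : pvGStep none (pvTs y.2) y.1 y.2 = (pvTs y.2, y.1, y.2, pvTs y.2) := rfl
      rw [this]
      exact hfold
    · intro q hq
      rcases List.mem_cons.mp hq with h | h
      · subst h; exact hle1
      · exact hall1 q h
    · intro q hq
      rcases List.mem_cons.mp hq with h | h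
      · subst h; exact hle2
      · exact hall2 q h

-- ---- group fold over Y equals head/last of the lex-sorted group of X ----
lemma pvGroup_fold_value {X Y : List (Int × List (String × Int))} (hperm : X.Perm Y)
    (hX : X.Pairwise pvLexLt) (hY : Y.Pairwise (fun p q => p.1 < q.1))
    (hnd : (Y.map Prod.fst).Nodup) (k : Int) (hk : pvGrp X k ≠ []) :
    (pvGrp Y k).foldl (fun s p => some (pvGStep s (pvTs p.2) p.1 p.2)) none = some (pvVX X k) := by
  have hXg : (pvGrp X k).Pairwise pvLexLt := List.Pairwise.sublist List.filter_sublist hX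
  have hYg : (pvGrp Y k).Pairwise (fun p q => p.1 < q.1) := List.Pairwise.sublist List.filter_sublist hY
  have hpermg : (pvGrp X k).Perm (pvGrp Y k) := hperm.filter _
  have hgne : pvGrp Y k ≠ [] := by
    intro h0
    apply hk
    rw [h0] at hpermg
    exact hpermg.eq_nil
  obtain ⟨pm', pM', hm1, hm2, hfold, hmin, hmax⟩ := pvGFold_closed _ hYg hgne
  obtain ⟨hh_mem, hh_min⟩ := pvHead_min hXg hk
  obtain ⟨hl_mem, hl_max⟩ := pvLast_max hXg hk
  have hndY : ((pvGrp Y k).map Prod.fst).Nodup := by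
    have hsub : List.Sublist ((pvGrp Y k).map Prod.fst) (Y.map Prod.fst) :=
      List.Sublist.map Prod.fst List.filter_sublist
    exact hnd.sublist hsub
  have hpm : pm' = (pvGrp X k).headD pvD0 := by
    refine pvLexLe_antisymm_mem hndY hm1 (hpermg.mem_iff.mp hh_mem) ?_ ?_
    · exact hmin _ (hpermg.mem_iff.mp hh_mem)
    · exact hh_min _ (hpermg.mem_iff.mpr hm1)
  have hpM : pM' = (pvGrp X k).getLastD pvD0 := by
    refine pvLexLe_antisymm_mem hndY hm2 (hpermg.mem_iff.mp hl_mem) ?_ ?_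
    · exact hl_max _ (hpermg.mem_iff.mpr hm2)
    · exact hmax _ (hpermg.mem_iff.mp hl_mem)
  rw [hfold, hpm, hpM]
  rfl

-- ---- order of first occurrences: the dedup of contents, mapped to group stats, is lex-increasing ----
lemma pvOrd : ∀ (X : List (Int × List (String × Int))), X.Pairwise pvLexLt →
    ((pvDedup (X.map (fun p => pvC p.2))).map (fun k => pvVX X k)).Pairwise
      (fun a b => a.1 < b.1 ∨ (a.1 = b.1 ∧ a.2.1 < b.2.1)) := by
  intro X
  induction X with
  | nil => intro _; simp [pvDedup]
  | cons p X ih =>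
    intro hX
    obtain ⟨hp, hX'⟩ := List.pairwise_cons.mp hX
    have hgrp_self : pvGrp (p :: X) (pvC p.2) = p :: pvGrp X (pvC p.2) := by
      simp [pvGrp]
    have hgrp_ne : ∀ k, k ≠ pvC p.2 → pvGrp (p :: X) k = pvGrp X k := by
      intro k hk
      have hb : (pvC p.2 == k) = false := by simp [Ne.symm hk]
      simp [pvGrp, hb]
    simp only [List.map_cons, pvDedup]
    refine List.Pairwise.cons ?_ ?_
    · intro b hb
      obtain ⟨k, hk_mem, rfl⟩ := List.mem_map.mp hb
      have hk_ne : k ≠ pvC p.2 := by simpa using (List.mem_filter.mp hk_mem).2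
      have hk_in : k ∈ X.map (fun p => pvC p.2) :=
        (pvMem_pvDedup _ _).mp (List.mem_filter.mp hk_mem).1
      have hgne : pvGrp X k ≠ [] := by
        obtain ⟨q, hq, hqk⟩ := List.mem_map.mp hk_in
        intro h0
        have hmem : q ∈ pvGrp X k := List.mem_filter.mpr ⟨hq, by simp [hqk]⟩
        rw [h0] at hmem
        simp at hmem
      have hh_mem : (pvGrp X k).headD pvD0 ∈ X :=
        List.mem_of_mem_filter ((pvHead_min (List.Pairwise.sublist List.filter_sublist hX') hgne).1)
      have hlt := hp _ hh_mem
      have e1 : pvVX (p :: X) (pvC p.2)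
          = (pvTs p.2, p.1, ((p :: pvGrp X (pvC p.2)).getLastD pvD0).2,
             pvTs ((p :: pvGrp X (pvC p.2)).getLastD pvD0).2) := by
        simp [pvVX, hgrp_self]
      have e2 : pvVX (p :: X) k = pvVX X k := by simp [pvVX, hgrp_ne k hk_ne]
      rw [e1, e2]
      unfold pvLexLt at hlt
      simp only [pvVX]
      exact hlt
    · have hmapeq : ((pvDedup (X.map (fun p => pvC p.2))).filter (fun x => x != pvC p.2)).map (fun k => pvVX (p :: X) k)
          = ((pvDedup (X.map (fun p => pvC p.2))).filter (fun x => x != pvC p.2)).map (fun k => pvVX X k) := by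
        apply List.map_congr_left
        intro k hk
        have hk_ne : k ≠ pvC p.2 := by simpa using (List.mem_filter.mp hk).2
        simp [pvVX, hgrp_ne k hk_ne]
      rw [hmapeq]
      exact List.Pairwise.sublist (List.Sublist.map _ List.filter_sublist) (ih hX')

-- ---- sorted2 is sorted by the lexicographic pair key ----
lemma pvSorted2_eq_sorted {α : Type} (xs : List α) (k1 k2 : α → Int) :
    PySem.List.sorted2 xs k1 k2 false = PySem.List.sorted xs (fun x => toLex (k1 x, k2 x)) false := by
  have hbe : (fun a b => decide (k1 a < k1 b) || (!decide (k1 b < k1 a) && decide (k2 a < k2 b)))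
      = (fun a b => decide (toLex (k1 a, k2 a) < toLex (k1 b, k2 b))) := by
    funext a b
    rcases lt_trichotomy (k1 a) (k1 b) with h | h | h <;>
      simp [Prod.Lex.toLex_lt_toLex, h, lt_asymm]
  simp only [PySem.List.sorted2, PySem.List.sorted]
  simp only [Bool.false_eq_true, if_false, hbe]

-- ---- max of timestamps: last element of the sorted list = max?-extremum ----
lemma pvGetLastD_mem {α : Type} (l : List α) (d : α) (h : l ≠ []) : l.getLastD d ∈ l := by
  induction l with
  | nil => exact absurd rfl h
  | cons a t ih =>
    by_cases htne : t = []
    · subst htne; simp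
    · rw [pvGetLastD_cons _ _ _ htne]
      exact List.mem_cons_of_mem a (ih htne)

lemma pvPairwise_le_getLastD (S : List (List (String × Int)))
    (h : S.Pairwise (fun a b => pvTs a ≤ pvTs b)) :
    ∀ q ∈ S, pvTs q ≤ pvTs (S.getLastD []) := by
  induction S with
  | nil => simp
  | cons x t ih =>
    obtain ⟨hx, ht⟩ := List.pairwise_cons.mp h
    by_cases htne : t = []
    · subst htne
      intro q hq
      rcases List.mem_cons.mp hq with h1 | h1
      · subst h1; simp
      · simp at h1
    · rw [pvGetLastD_cons _ _ _ htne]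
      intro q hq
      rcases List.mem_cons.mp hq with h1 | h1
      · subst h1
        exact hx _ (pvGetLastD_mem t _ htne)
      · exact ih ht q h1
lemma pvPyGetD_neg_one {α : Type} (l : List α) (d : α) (h : l ≠ []) :
    PySem.List.pyGetD l (-1) d = l.getLastD d := by
  have hn : 1 ≤ l.length := List.length_pos_iff.mpr h
  have hn' : (1 : Int) ≤ (l.length : Int) := by exact_mod_cast hn
  rw [List.getLastD_eq_getLast?, List.getLast?_eq_getElem?]
  simp only [PySem.List.pyGetD, PySem.List.pyGet?, PySem.List.pyIdx?]
  have h0 : ¬ (0 : Int) ≤ -1 := by norm_num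
  have h1 : -(l.length : Int) ≤ -1 := by omega
  rw [if_neg h0, if_pos h1]
  norm_num

-- ===== VERDICT (by name: the statement is the Claim_ definition above) =====
theorem unique_messages_within_window_spec : Claim_equal_unique_messages_within_window := by
  intro window messages hdom hpre
  unfold Spec_unique_messages_within_window
  clear hdom hpre
  by_cases hnil : messages = []
  · subst hnil; rfl
  · obtain ⟨mx, hmx⟩ : ∃ mx, PySem.List.max? messages (fun m => pvTs m) = some mx := by
      cases h : PySem.List.max? messages (fun m => pvTs m) with
      | none => exact absurd ((PySem.List.max?_eq_none_iff _ _).mp h) hnil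
      | some m => exact ⟨m, rfl⟩
    simp only [unique_messages_within_window, unique_messages_within_window_alt, if_neg hnil, hmx]
    set S := PySem.List.sorted messages (fun m => pvTs m) false with hSdef
    have hSperm : S.Perm messages := PySem.List.sorted_perm _ _ _
    have hSne : S ≠ [] := fun h => hnil ((PySem.List.sorted_eq_nil_iff _ _ _).mp h)
    have hlast : PySem.List.pyGetD S (-1) [] = S.getLastD [] := pvPyGetD_neg_one S [] hSne
    have hlatest : pvTs (S.getLastD []) = pvTs mx := by
      apply le_antisymm
      · exact PySem.List.max?_isMax hmx _ (hSperm.mem_iff.mp (pvGetLastD_mem S [] hSne))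
      · exact pvPairwise_le_getLastD S (hSdef ▸ PySem.List.sorted_pairwise messages (fun m => pvTs m)) _
          (hSperm.mem_iff.mpr (PySem.List.max?_mem hmx))
    rw [hlast, hlatest]
    set E := pvEnum 0 messages with hEdef
    set S2 := PySem.List.sorted E pvKeyE false with hS2def
    have hstab : S = S2.map Prod.snd := pvStab messages
    rw [hstab, List.filter_map]
    simp only [Function.comp_def]
    -- B side: turn the skip-if fold into a fold over the filtered list
    have hstepfun : (fun (d : PySem.Dict Int (Int × Int × List (String × Int) × Int)) (p : Int × List (String × Int)) =>
          if window < pvTs mx - pvTs p.2 then d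
          else d.insert (pvC p.2) (pvGStep (d.get? (pvC p.2)) (pvTs p.2) p.1 p.2))
        = (fun d p => if pvTs mx - pvTs p.2 ≤ window then
            d.insert (pvC p.2) (pvGStep (d.get? (pvC p.2)) (pvTs p.2) p.1 p.2) else d) := by
      funext d p
      by_cases h : pvTs mx - pvTs p.2 ≤ window
      · rw [if_pos h, if_neg (not_lt.mpr h)]
      · rw [if_neg h, if_pos (not_le.mp h)]
    rw [hstepfun, PySem.List.foldl_ite_eq_foldl_filter
      (fun p => pvTs mx - pvTs p.2 ≤ window)
      (fun d p => d.insert (pvC p.2) (pvGStep (d.get? (pvC p.2)) (pvTs p.2) p.1 p.2)) E PySem.Dict.empty]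
    set X := S2.filter (fun p => decide (pvTs mx - pvTs p.2 ≤ window)) with hXdef
    set Y := E.filter (fun p => decide (pvTs mx - pvTs p.2 ≤ window)) with hYdef
    have hXY : X.Perm Y := (PySem.List.sorted_perm E pvKeyE false).filter _
    have hXlex : X.Pairwise pvLexLt :=
      List.Pairwise.sublist List.filter_sublist (pvSortedE_pairwise messages)
    have hYidx : Y.Pairwise (fun p q => p.1 < q.1) :=
      List.Pairwise.sublist List.filter_sublist (pvEnum_pairwise messages 0)
    have hndE : (E.map Prod.fst).Nodup := by
      unfold List.Nodup
      rw [List.pairwise_map]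
      exact (pvEnum_pairwise messages 0).imp (fun h => Int.ne_of_lt h)
    have hndY : (Y.map Prod.fst).Nodup := hndE.sublist (List.Sublist.map Prod.fst List.filter_sublist)
    have hmemX : ∀ k, k ∈ X.map (fun p => pvC p.2) → pvGrp X k ≠ [] := by
      intro k hk h0
      obtain ⟨q, hq, hqk⟩ := List.mem_map.mp hk
      have hmem : q ∈ pvGrp X k := List.mem_filter.mpr ⟨hq, by simp [hqk]⟩
      rw [h0] at hmem
      simp at hmem
    -- A side: the dict values are last-per-content over X, keys in first-occurrence order
    set dA := (X.map Prod.snd).foldl (fun d m => d.insert (pvC m) m)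
      (PySem.Dict.empty : PySem.Dict Int (List (String × Int))) with hdAdef
    have hkeysA : dA.keys = pvDedup (X.map (fun p => pvC p.2)) := by
      have h1 := PySem.Dict.keys_foldl_insert_key (l := X.map Prod.snd) (key := pvC)
        (f := fun _ m => m) (d := (PySem.Dict.empty : PySem.Dict Int (List (String × Int))))
      rw [PySem.Dict.keys_empty] at h1
      calc dA.keys = PySem.Set.update [] ((X.map Prod.snd).map pvC) := h1
        _ = PySem.Set.ofList ((X.map Prod.snd).map pvC) := rfl
        _ = pvDedup ((X.map Prod.snd).map pvC) := pvOfList_eq_pvDedup _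
        _ = pvDedup (X.map (fun p => pvC p.2)) := by simp [List.map_map, Function.comp_def]
    have hnodupA : dA.keys.Nodup :=
      PySem.Dict.nodup_keys_foldl_insert_key _ pvC (fun _ m => m) _ PySem.Dict.nodup_keys_empty
    have hvalA : ∀ k ∈ X.map (fun p => pvC p.2), dA.getD k [] = ((pvGrp X k).getLastD pvD0).2 := by
      intro k hkmem
      have hgne := hmemX k hkmem
      obtain ⟨z, hz⟩ := pvGetLast?_some (pvGrp X k) hgne
      have hzD : (pvGrp X k).getLastD pvD0 = z := by
        rw [List.getLastD_eq_getLast?, hz]; rfl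
      rw [PySem.Dict.getD_eq_get?_getD, hdAdef, pvDictA_get?, PySem.Dict.get?_empty, Option.or_none]
      rw [← List.map_reverse, List.find?_map]
      have hfind : X.reverse.find? ((fun m => pvC m == k) ∘ Prod.snd) = (pvGrp X k).getLast? := by
        rw [← List.head?_filter, List.filter_reverse, List.head?_reverse]
        rfl
      rw [hfind, hz, hzD]
      rfl
    have hA : dA.values = (pvDedup (X.map (fun p => pvC p.2))).map (fun k => ((pvGrp X k).getLastD pvD0).2) := by
      rw [PySem.Dict.values_eq_map_keys dA hnodupA [], hkeysA]
      apply List.map_congr_left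
      intro k hk
      exact hvalA k ((pvMem_pvDedup _ _).mp hk)
    -- B side: the dict values are the group stats, keys in Y first-occurrence order
    set dB := Y.foldl (fun d p => d.insert (pvC p.2) (pvGStep (d.get? (pvC p.2)) (pvTs p.2) p.1 p.2))
      (PySem.Dict.empty : PySem.Dict Int (Int × Int × List (String × Int) × Int)) with hdBdef
    have hkeysB : dB.keys = pvDedup (Y.map (fun p => pvC p.2)) := by
      have h1 := PySem.Dict.keys_foldl_insert_key (l := Y)
        (key := fun p : Int × List (String × Int) => pvC p.2)
        (f := fun (d : PySem.Dict Int (Int × Int × List (String × Int) × Int))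
          (p : Int × List (String × Int)) => pvGStep (d.get? (pvC p.2)) (pvTs p.2) p.1 p.2)
        (d := (PySem.Dict.empty : PySem.Dict Int (Int × Int × List (String × Int) × Int)))
      rw [PySem.Dict.keys_empty] at h1
      calc dB.keys = PySem.Set.update [] (Y.map (fun p => pvC p.2)) := h1
        _ = PySem.Set.ofList (Y.map (fun p => pvC p.2)) := rfl
        _ = pvDedup (Y.map (fun p => pvC p.2)) := pvOfList_eq_pvDedup _
    have hnodupB : dB.keys.Nodup :=
      PySem.Dict.nodup_keys_foldl_insert_key _ (fun p : Int × List (String × Int) => pvC p.2) _ _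
        PySem.Dict.nodup_keys_empty
    have hvalB : ∀ k ∈ Y.map (fun p => pvC p.2), dB.getD k (0, 0, [], 0) = pvVX X k := by
      intro k hkmem
      have hkX : k ∈ X.map (fun p => pvC p.2) := ((hXY.map _).mem_iff).mpr hkmem
      have hgXne : pvGrp X k ≠ [] := hmemX k hkX
      rw [PySem.Dict.getD_eq_get?_getD, hdBdef, pvDictB_get?, PySem.Dict.get?_empty]
      have hgrp : Y.filter (fun p => pvC p.2 == k) = pvGrp Y k := rfl
      rw [hgrp, pvGroup_fold_value hXY hXlex hYidx hndY k hgXne]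
      rfl
    have hB : dB.values = (pvDedup (Y.map (fun p => pvC p.2))).map (fun k => pvVX X k) := by
      rw [PySem.Dict.values_eq_map_keys dB hnodupB (0, 0, [], 0), hkeysB]
      apply List.map_congr_left
      intro k hk
      exact hvalB k ((pvMem_pvDedup _ _).mp hk)
    rw [hA, hB, pvSorted2_eq_sorted]
    have hsorted : PySem.List.sorted ((pvDedup (Y.map (fun p => pvC p.2))).map (fun k => pvVX X k))
        (fun g => toLex (g.1, g.2.1)) false
        = (pvDedup (X.map (fun p => pvC p.2))).map (fun k => pvVX X k) := by
      apply PySem.List.sorted_eq_of_perm_of_pairwise_lt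
      · apply List.Perm.map
        refine (List.perm_ext_iff_of_nodup (pvNodup_pvDedup _) (pvNodup_pvDedup _)).mpr ?_
        intro a
        rw [pvMem_pvDedup, pvMem_pvDedup]
        exact (hXY.map _).mem_iff
      · refine List.Pairwise.imp ?_ (pvOrd X hXlex)
        intro a b h
        exact Prod.Lex.toLex_lt_toLex.mpr (by simpa using h)
    rw [hsorted, List.map_map]
    apply List.map_congr_left
    intro k hk
    rfl
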